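-- pv_equiv track=rewrite | github.com/Hxmxx/Beakjoon | 백준/Bronze/2037. 문자메시지/문자메시지.py | calculate_typing_time
-- ===== SOURCE A (Python) =====
-- def calculate_typing_time(p, w, message):
--     keypad = {
--         ' ': (1, 1),
--         'A': (2, 1), 'B': (2, 2), 'C': (2, 3),
--         'D': (3, 1), 'E': (3, 2), 'F': (3, 3),
--         'G': (4, 1), 'H': (4, 2), 'I': (4, 3),
--         'J': (5, 1), 'K': (5, 2), 'L': (5, 3),
--         'M': (6, 1), 'N': (6, 2), 'O': (6, 3),
--         'P': (7, 1), 'Q': (7, 2), 'R': (7, 3), 'S': (7, 4),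
--         'T': (8, 1), 'U': (8, 2), 'V': (8, 3),
--         'W': (9, 1), 'X': (9, 2), 'Y': (9, 3), 'Z': (9, 4),
--     }
--
--     total_time = 0
--     prev_key = None
--
--     for char in message:
--         key, presses = keypad[char]
--         total_time += presses * p
--
--         # 같은 키 연속 입력 시 대기 시간 추가
--         if prev_key == key and key != 1:  # 공백(1)은 연속입력 대기 없음
--             total_time += w
--
--         prev_key = key
--
--     return total_time
-- ===== SOURCE B (Python) =====
-- def calculate_typing_time(p, w, message):
--     def key_press(c):
--         # arithmetic keypad layout instead of a dict: A..O are 3 per key,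
--         # PQRS on 7, TUV on 8, WXYZ on 9; space is key 1
--         if c == ' ':
--             return (1, 1)
--         i = ord(c) - ord('A')
--         if not 0 <= i < 26:
--             raise KeyError(c)
--         if i < 15:
--             return (2 + i // 3, i % 3 + 1)
--         if i < 19:
--             return (7, i - 14)
--         if i < 22:
--             return (8, i - 18)
--         return (9, i - 21)
--
--     keys = [key_press(c)[0] for c in message]
--     total = p * sum(key_press(c)[1] for c in message)
--     for a, b in zip(keys, keys[1:]):
--         if a == b != 1:
--             total += w
--     return total
-- ===== Notes on version B (the rewrite author's own statement) =====
-- stated objective: alternative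
-- what changed: Replaces A's dict lookup and single stateful prev_key loop with an arithmetic key/press formula computed from the character code plus two separate passes: p times the sum of press counts, then a pairwise scan over the precomputed key list adding w for equal adjacent non-space keys.
import Mathlib
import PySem

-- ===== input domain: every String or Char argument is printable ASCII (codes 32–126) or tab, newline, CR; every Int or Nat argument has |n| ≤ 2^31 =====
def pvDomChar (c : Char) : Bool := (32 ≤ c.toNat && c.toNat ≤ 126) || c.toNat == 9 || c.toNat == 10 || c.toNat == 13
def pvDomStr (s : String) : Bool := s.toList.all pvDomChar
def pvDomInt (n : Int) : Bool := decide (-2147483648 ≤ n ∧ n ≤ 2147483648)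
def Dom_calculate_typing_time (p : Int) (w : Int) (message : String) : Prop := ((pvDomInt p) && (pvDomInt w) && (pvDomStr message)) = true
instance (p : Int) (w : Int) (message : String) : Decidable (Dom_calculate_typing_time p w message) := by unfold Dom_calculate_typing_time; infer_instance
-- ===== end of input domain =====

-- B replaces A's keypad dict and single stateful prev_key loop by an arithmetic
-- key/press formula on the character code and two separate passes (objective: alternative).


-- ===== PORT A =====
-- A's keypad dict literal
def keypad : PySem.Dict Char (Int × Int) := PySem.Dict.ofList
  [(' ', (1, 1)),
   ('A', (2, 1)), ('B', (2, 2)), ('C', (2, 3)),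
   ('D', (3, 1)), ('E', (3, 2)), ('F', (3, 3)),
   ('G', (4, 1)), ('H', (4, 2)), ('I', (4, 3)),
   ('J', (5, 1)), ('K', (5, 2)), ('L', (5, 3)),
   ('M', (6, 1)), ('N', (6, 2)), ('O', (6, 3)),
   ('P', (7, 1)), ('Q', (7, 2)), ('R', (7, 3)), ('S', (7, 4)),
   ('T', (8, 1)), ('U', (8, 2)), ('V', (8, 3)),
   ('W', (9, 1)), ('X', (9, 2)), ('Y', (9, 3)), ('Z', (9, 4))]

-- keypad[char]; Python raises KeyError on a miss — Pre_ excludes exactly those inputs,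
-- the (0,0) default is never reached inside Pre_
def kpLookup (c : Char) : Int × Int := (keypad.get? c).getD (0, 0)

-- A's loop: state (total_time, prev_key)
def loopA (p w : Int) : Int × Option Int → List Char → Int × Option Int
  | st, [] => st
  | (total, prev), c :: rest =>
      let kp := kpLookup c
      let total := total + kp.2 * p
      let total := if prev = some kp.1 ∧ kp.1 ≠ 1 then total + w else total
      loopA p w (total, some kp.1) rest

def calculate_typing_time (p : Int) (w : Int) (message : String) : Int :=
  (loopA p w (0, none) message.toList).1

-- ===== PORT B =====
-- B's arithmetic (key, presses) formula; the out-of-range branch raises KeyError in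
-- Python (excluded by Pre_), so that branch's value here is never reached inside Pre_
def keyPress (c : Char) : Int × Int :=
  if c = ' ' then (1, 1)
  else
    let i : Int := (c.toNat : Int) - 65
    if i < 15 then (2 + PySem.Int.floordiv i 3, PySem.Int.mod i 3 + 1)
    else if i < 19 then (7, i - 14)
    else if i < 22 then (8, i - 18)
    else (9, i - 21)

def calculate_typing_time_alt (p : Int) (w : Int) (message : String) : Int :=
  let l := message.toList
  let keys := l.map (fun c => (keyPress c).1)
  let total := p * (l.map (fun c => (keyPress c).2)).sum
  (keys.zip keys.tail).foldl
    (fun total ab => if ab.1 = ab.2 ∧ ab.2 ≠ 1 then total + w else total) total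

-- ===== PRECONDITION & SPEC =====
-- Pre_ excludes exactly the inputs where Python's keypad[char] raises KeyError:
-- characters other than space and uppercase A–Z.
def Pre_calculate_typing_time (p : Int) (w : Int) (message : String) : Prop :=
  message.toList.all (fun c => c = ' ' || ('A' ≤ c && c ≤ 'Z')) = true
instance (p : Int) (w : Int) (message : String) : Decidable (Pre_calculate_typing_time p w message) := by unfold Pre_calculate_typing_time; infer_instance

def pvWitness_calculate_typing_time : Int × Int × String := (2, 3, "HELLO WORLD")

def Spec_calculate_typing_time (p : Int) (w : Int) (message : String) (out : Int) : Prop := out = calculate_typing_time_alt p w message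
instance (p : Int) (w : Int) (message : String) (out : Int) : Decidable (Spec_calculate_typing_time p w message out) := by unfold Spec_calculate_typing_time; infer_instance

-- ===== CLAIM (what is proved, stated in full; the proofs are below) =====
def Claim_equal_calculate_typing_time : Prop := ∀ (p : Int) (w : Int) (message : String), Dom_calculate_typing_time p w message → Pre_calculate_typing_time p w message → Spec_calculate_typing_time p w message (calculate_typing_time p w message)

-- ===== LEMMAS AND PROOFS =====

-- on the admitted characters the arithmetic formula agrees with the dict
theorem keyPress_eq_kpLookup (c : Char) (h : (c = ' ' || ('A' ≤ c && c ≤ 'Z')) = true) :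
    keyPress c = kpLookup c := by
  simp only [Bool.or_eq_true, Bool.and_eq_true, decide_eq_true_eq] at h
  rcases h with h | ⟨h1, h2⟩
  · subst h; decide
  · have e : Char.ofNat c.toNat = c := Char.ofNat_toNat c
    have l1 : 65 ≤ c.toNat := h1
    have l2 : c.toNat ≤ 90 := h2
    interval_cases h : c.toNat <;> rw [← e] <;> decide

-- penalty accumulated by A's loop starting from a previous key
def penFrom (w : Int) : Option Int → List Char → Int
  | _, [] => 0
  | prev, c :: rest =>
      (if prev = some (kpLookup c).1 ∧ (kpLookup c).1 ≠ 1 then w else 0) +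
        penFrom w (some (kpLookup c).1) rest

-- B's penalty on the key list of a char list
def zipPen (w : Int) (l : List Char) : Int :=
  ((l.zip l.tail).map
    (fun ab => if (kpLookup ab.1).1 = (kpLookup ab.2).1 ∧ (kpLookup ab.2).1 ≠ 1 then w else 0)).sum

theorem loopA_eq (p w : Int) (l : List Char) (t : Int) (prev : Option Int) :
    (loopA p w (t, prev) l).1 = t + p * (l.map (fun c => (kpLookup c).2)).sum + penFrom w prev l := by
  induction l generalizing t prev with
  | nil => simp [loopA, penFrom]
  | cons c rest ih =>
      simp only [loopA, penFrom, List.map_cons, List.sum_cons]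
      rw [ih]
      split_ifs <;> ring

theorem penFrom_some_eq (w : Int) (l : List Char) (c : Char) :
    penFrom w (some (kpLookup c).1) l = zipPen w (c :: l) := by
  induction l generalizing c with
  | nil => simp [penFrom, zipPen]
  | cons d rest ih =>
      simp only [penFrom, zipPen, List.tail_cons, List.zip_cons_cons, List.map_cons,
        List.sum_cons, Option.some.injEq] at *
      rw [ih]

theorem penFrom_none_eq (w : Int) (l : List Char) : penFrom w none l = zipPen w l := by
  cases l with
  | nil => simp [penFrom, zipPen]
  | cons c rest =>
      simp only [penFrom, reduceCtorEq, false_and, if_false, zero_add]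
      exact penFrom_some_eq w rest c

-- a foldl that conditionally adds w equals the start plus the sum of the if-values
theorem foldl_addIf (w : Int) (P : Int × Int → Prop) [DecidablePred P]
    (l : List (Int × Int)) (t : Int) :
    l.foldl (fun total ab => if P ab then total + w else total) t
      = t + (l.map (fun ab => if P ab then w else 0)).sum := by
  induction l generalizing t with
  | nil => simp
  | cons a rest ih =>
      simp only [List.foldl_cons, List.map_cons, List.sum_cons, ih]
      split_ifs <;> ring

-- ===== VERDICT (by name: the statement is the Claim_ definition above) =====
theorem calculate_typing_time_spec : Claim_equal_calculate_typing_time := by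
  intro p w message _ hpre
  unfold Pre_calculate_typing_time at hpre
  rw [List.all_eq_true] at hpre
  unfold Spec_calculate_typing_time calculate_typing_time
  simp only [calculate_typing_time_alt]
  rw [loopA_eq, penFrom_none_eq]
  set l := message.toList with hl
  have hmap : ∀ f : (Int × Int) → Int,
      l.map (fun c => f (keyPress c)) = l.map (fun c => f (kpLookup c)) := by
    intro f
    exact List.map_congr_left (fun c hc => by rw [keyPress_eq_kpLookup c (hpre c hc)])
  rw [hmap (·.1), hmap (·.2), foldl_addIf, zipPen]
  have hz : ((l.map fun c => (kpLookup c).1).zip ((l.map fun c => (kpLookup c).1).tail))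
      = (l.zip l.tail).map (fun ab => ((kpLookup ab.1).1, (kpLookup ab.2).1)) := by
    rw [← List.map_tail, List.zip_map]
    rfl
  rw [hz, List.map_map]
  ring_nf
  rfl
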